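-- pv_equiv track=rewrite | github.com/CMacM/CosyMAML | logs/plot_ops.py | filter_zero_intervals_with_none
-- ===== SOURCE A (Python) =====
-- def filter_zero_intervals_with_none(y, timestamps): # Function to filter zero intervals, to make plot more readable
--     if not y or not timestamps or len(y) != len(timestamps):
--         raise ValueError("Lists must have the same length and must not be empty.")
--
--     in_zero_sequence = False
--     zero_start_index = None
--
--     for i in range(len(y)-1):
--         if y[i] == 0:
--             if not in_zero_sequence:
--                 in_zero_sequence = True
--                 zero_start_index = i
--             else:
--                 y[i] = None
--         else:
--             if in_zero_sequence:
--                 in_zero_sequence = False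
--
--     return y, timestamps
-- ===== SOURCE B (Python) =====
-- def filter_zero_intervals_with_none(y, timestamps):
--     # Stateless pairwise criterion: a zero (before the last index) is blanked
--     # iff its immediate predecessor is also zero. Decisions are computed from
--     # the original values first, then applied (y is mutated in place like A).
--     if not y or not timestamps or len(y) != len(timestamps):
--         raise ValueError("Lists must have the same length and must not be empty.")
--     blank = [i for i in range(1, len(y) - 1) if y[i] == 0 and y[i - 1] == 0]
--     for i in blank:
--         y[i] = None
--     return y, timestamps
-- ===== Notes on version B (the rewrite author's own statement) =====
-- stated objective: simpler
-- what changed: Replaces A's stateful in_zero_sequence scan with a stateless pairwise criterion: collect the indices (before the last) whose element and predecessor are both zero, then blank exactly those; same single-pass O(n) cost.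
import Mathlib
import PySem

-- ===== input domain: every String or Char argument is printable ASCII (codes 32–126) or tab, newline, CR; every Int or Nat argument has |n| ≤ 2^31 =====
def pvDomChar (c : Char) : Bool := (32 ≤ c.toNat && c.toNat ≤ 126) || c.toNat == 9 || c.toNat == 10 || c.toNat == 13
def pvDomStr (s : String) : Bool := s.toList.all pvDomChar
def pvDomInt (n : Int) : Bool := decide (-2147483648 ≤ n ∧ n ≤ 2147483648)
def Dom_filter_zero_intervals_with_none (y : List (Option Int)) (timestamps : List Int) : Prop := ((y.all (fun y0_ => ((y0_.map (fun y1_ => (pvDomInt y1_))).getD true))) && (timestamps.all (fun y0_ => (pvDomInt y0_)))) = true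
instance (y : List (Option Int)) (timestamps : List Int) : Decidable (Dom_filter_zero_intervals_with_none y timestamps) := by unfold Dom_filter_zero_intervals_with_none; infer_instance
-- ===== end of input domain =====

-- ===== PORT A =====
-- B changes only how the return value is computed (proved below); both the
-- Python A and B mutate the list y in place, the theorems are about the
-- returned value.
def pvStepA (st : List (Option Int) × Bool) (i : Nat) : List (Option Int) × Bool :=
  if st.1[i]?.getD none = some 0 then    -- if y[i] == 0:
    if !st.2 then (st.1, true)           --   start of a zero run
    else (st.1.set i none, true)         --   interior zero: y[i] = None
  else
    if st.2 then (st.1, false) else st   -- leaving a zero run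

def filter_zero_intervals_with_none (y : List (Option Int)) (timestamps : List Int) : List (Option Int) × List Int :=
  -- for i in range(len(y)-1): stateful scan with state (y, in_zero_sequence)
  let st := (List.range' 0 (y.length - 1)).foldl pvStepA (y, false)
  (st.1, timestamps)

-- ===== PORT B =====
def filter_zero_intervals_with_none_alt (y : List (Option Int)) (timestamps : List Int) : List (Option Int) × List Int :=
  -- blank = [i for i in range(1, len(y)-1) if y[i] == 0 and y[i-1] == 0]
  let blank := (List.range' 1 (y.length - 2)).filter
    (fun i => decide (y[i]?.getD none = some 0) && decide (y[i-1]?.getD none = some 0))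
  -- for i in blank: y[i] = None
  (blank.foldl (fun ys i => ys.set i none) y, timestamps)

-- ===== PRECONDITION & SPEC =====
-- Pre_ excludes exactly the inputs on which A raises ValueError: an empty list
-- or two lists of different lengths.
def Pre_filter_zero_intervals_with_none (y : List (Option Int)) (timestamps : List Int) : Prop :=
  y ≠ [] ∧ timestamps ≠ [] ∧ y.length = timestamps.length
instance (y : List (Option Int)) (timestamps : List Int) : Decidable (Pre_filter_zero_intervals_with_none y timestamps) := by unfold Pre_filter_zero_intervals_with_none; infer_instance
def pvWitness_filter_zero_intervals_with_none : List (Option Int) × List Int := ([some 0, some 0, some 0, some 1], [1, 2, 3, 4])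
def Spec_filter_zero_intervals_with_none (y : List (Option Int)) (timestamps : List Int) (out : List (Option Int) × List Int) : Prop := out = filter_zero_intervals_with_none_alt y timestamps
instance (y : List (Option Int)) (timestamps : List Int) (out : List (Option Int) × List Int) : Decidable (Spec_filter_zero_intervals_with_none y timestamps out) := by unfold Spec_filter_zero_intervals_with_none; infer_instance

-- ===== CLAIM (what is proved, stated in full; the proofs are below) =====
def Claim_equal_filter_zero_intervals_with_none : Prop := ∀ (y : List (Option Int)) (timestamps : List Int), Dom_filter_zero_intervals_with_none y timestamps → Pre_filter_zero_intervals_with_none y timestamps → Spec_filter_zero_intervals_with_none y timestamps (filter_zero_intervals_with_none y timestamps)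

-- ===== LEMMAS AND PROOFS =====

-- B side: folding `set · none` over a list of indices blanks exactly those indices.
lemma foldl_set_getElem? (l : List Nat) (y : List (Option Int)) (j : Nat) :
    (l.foldl (fun ys i => ys.set i none) y)[j]? =
      if j ∈ l ∧ j < y.length then some none else y[j]? := by
  induction l generalizing y with
  | nil => simp
  | cons i t ih =>
    rw [List.foldl_cons, ih (y.set i none)]
    by_cases hj : j < y.length
    · by_cases hmem : j ∈ t
      · simp [hmem, hj]
      · by_cases hij : i = j
        · subst hij
          rw [if_neg (by simp [hmem]), if_pos ⟨by simp, hj⟩, List.getElem?_set]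
          simp [hj]
        · rw [if_neg (by simp [hmem]), List.getElem?_set, if_neg hij,
              if_neg (by
                rintro ⟨hm, -⟩
                rcases List.mem_cons.mp hm with h | h
                · exact hij h.symm
                · exact hmem h)]
    · have hj' : ¬ j < (y.set i none).length := by simpa using hj
      rw [if_neg (fun h => hj' h.2), if_neg (fun h => hj h.2), List.getElem?_set]
      by_cases hij : i = j
      · subst hij
        rw [if_pos rfl, if_neg hj, List.getElem?_eq_none (by omega)]
      · rw [if_neg hij]

-- A side: characterisation of the stateful scan over range' s k; the scan only
-- writes at indices it has already read, so reads always see the original y0.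
lemma scanA_getElem? (y0 : List (Option Int)) :
    ∀ (k s : Nat) (ys : List (Option Int)) (inz : Bool),
      (∀ j, s ≤ j → ys[j]? = y0[j]?) →
      (inz = true ↔ (0 < s ∧ y0[s-1]?.getD none = some 0)) →
      ∀ j,
      (((List.range' s k).foldl pvStepA (ys, inz)).1)[j]? =
        if s ≤ j ∧ j < s + k ∧ y0[j]?.getD none = some 0 ∧ 0 < j ∧ y0[j-1]?.getD none = some 0
        then some none else ys[j]? := by
  intro k
  induction k with
  | zero =>
    intro s ys inz _ _ j
    rw [List.range'_zero, List.foldl_nil, if_neg (by rintro ⟨h1, h2, -⟩; omega)]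
  | succ k ih =>
    intro s ys inz hread hinz j
    have hrs : List.range' s (k+1) = s :: List.range' (s+1) k := by
      simp [List.range'_succ]
    rw [hrs, List.foldl_cons]
    by_cases hz : ys[s]?.getD none = some 0
    · have hz0 : y0[s]?.getD none = some 0 := by rw [← hread s le_rfl]; exact hz
      by_cases hi : inz = true
      · -- interior zero: blank index s
        obtain ⟨hs0, hprev⟩ := hinz.mp hi
        have hstep : pvStepA (ys, inz) s = (ys.set s none, true) := by
          simp [pvStepA, hz, hi]
        have hslt : s < ys.length := by
          by_contra h
          rw [List.getElem?_eq_none (le_of_not_gt h)] at hz; simp at hz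
        rw [hstep,
            ih (s+1) (ys.set s none) true
              (fun j hj => by
                rw [List.getElem?_set, if_neg (by omega)]
                exact hread j (by omega))
              ⟨fun _ => ⟨by omega, by simpa using hz0⟩, fun _ => rfl⟩ j]
        by_cases hjs : j = s
        · subst hjs
          rw [if_neg (by rintro ⟨h1, -⟩; omega),
              if_pos ⟨le_rfl, by omega, hz0, hs0, hprev⟩,
              List.getElem?_set, if_pos rfl, if_pos hslt]
        · rw [List.getElem?_set, if_neg (show ¬ (s = j) from fun h => hjs h.symm)]
          by_cases hc : s + 1 ≤ j ∧ j < s + 1 + k ∧ y0[j]?.getD none = some 0 ∧ 0 < j ∧ y0[j-1]?.getD none = some 0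
          · rw [if_pos hc, if_pos ⟨by omega, by omega, hc.2.2⟩]
          · rw [if_neg hc, if_neg (by
              rintro ⟨h1, h2, h3⟩
              exact hc ⟨by omega, by omega, h3⟩)]
      · -- first zero of a run: only the flag changes
        have hi' : inz = false := by cases inz <;> simp_all
        subst hi'
        have hstep : pvStepA (ys, false) s = (ys, true) := by
          simp [pvStepA, hz]
        rw [hstep,
            ih (s+1) ys true (fun j hj => hread j (by omega))
              ⟨fun _ => ⟨by omega, by simpa using hz0⟩, fun _ => rfl⟩ j]
        by_cases hjs : j = s
        · subst hjs
          rw [if_neg (by rintro ⟨h1, -⟩; omega),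
              if_neg (by
                rintro ⟨-, -, -, hj0, hprev⟩
                exact hi (hinz.mpr ⟨hj0, hprev⟩))]
        · by_cases hc : s + 1 ≤ j ∧ j < s + 1 + k ∧ y0[j]?.getD none = some 0 ∧ 0 < j ∧ y0[j-1]?.getD none = some 0
          · rw [if_pos hc, if_pos ⟨by omega, by omega, hc.2.2⟩]
          · rw [if_neg hc, if_neg (by
              rintro ⟨h1, h2, h3⟩
              exact hc ⟨by omega, by omega, h3⟩)]
    · -- non-zero element: the flag goes (or stays) false
      have hz0 : ¬ y0[s]?.getD none = some 0 := by rw [← hread s le_rfl]; exact hz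
      have hstep : pvStepA (ys, inz) s = (ys, false) := by
        cases inz <;> simp [pvStepA, hz]
      rw [hstep,
          ih (s+1) ys false (fun j hj => hread j (by omega))
            (by simp [hz0]) j]
      by_cases hjs : j = s
      · subst hjs
        rw [if_neg (by rintro ⟨h1, -⟩; omega),
            if_neg (by rintro ⟨-, -, h3, -⟩; exact hz0 h3)]
      · by_cases hc : s + 1 ≤ j ∧ j < s + 1 + k ∧ y0[j]?.getD none = some 0 ∧ 0 < j ∧ y0[j-1]?.getD none = some 0
        · rw [if_pos hc, if_pos ⟨by omega, by omega, hc.2.2⟩]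
        · rw [if_neg hc, if_neg (by
            rintro ⟨h1, h2, h3⟩
            exact hc ⟨by omega, by omega, h3⟩)]

-- membership in B's blank list
lemma mem_blank (y : List (Option Int)) (j : Nat) :
    (j ∈ (List.range' 1 (y.length - 2)).filter
      (fun i => decide (y[i]?.getD none = some 0) && decide (y[i-1]?.getD none = some 0)))
    ↔ (1 ≤ j ∧ j < y.length - 1 ∧ y[j]?.getD none = some 0 ∧ y[j-1]?.getD none = some 0) := by
  simp only [List.mem_filter, List.mem_range', Bool.and_eq_true, decide_eq_true_eq]
  constructor
  · rintro ⟨⟨i, hi, rfl⟩, h1, h2⟩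
    exact ⟨by omega, by omega, h1, h2⟩
  · rintro ⟨h0, h1, h2, h3⟩
    exact ⟨⟨j - 1, by omega, by omega⟩, h2, h3⟩

-- ===== VERDICT (by name: the statement is the Claim_ definition above) =====
theorem filter_zero_intervals_with_none_spec : Claim_equal_filter_zero_intervals_with_none := by
  intro y timestamps _ _
  unfold Spec_filter_zero_intervals_with_none
  unfold filter_zero_intervals_with_none filter_zero_intervals_with_none_alt
  simp only
  refine Prod.ext ?_ rfl
  apply List.ext_getElem?
  intro j
  rw [scanA_getElem? y (y.length - 1) 0 y false (fun _ _ => rfl) (by simp) j,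
      foldl_set_getElem?]
  by_cases hc : 1 ≤ j ∧ j < y.length - 1 ∧ y[j]?.getD none = some 0 ∧ y[j-1]?.getD none = some 0
  · rw [if_pos ⟨by omega, by omega, hc.2.2.1, by omega, hc.2.2.2⟩,
        if_pos ⟨(mem_blank y j).mpr hc, by omega⟩]
  · rw [if_neg (by
        rintro ⟨-, h2, h3, h4, h5⟩
        exact hc ⟨by omega, by omega, h3, h5⟩),
      if_neg (by
        rintro ⟨hm, -⟩
        exact hc ((mem_blank y j).mp hm))]
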